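-- pv_equiv track=rewrite | github.com/StableConfusion/antijam | commentary.py | cut_commentator
-- ===== SOURCE A (Python) =====
-- def cut_commentator(speech: str):
--     speech_split = speech.split(' ')
--
--     res = []
--     i = len(speech_split) - 1
--     while i > 0:
--         if "Commentator" in speech_split[i]:
--             break
--         res.append(speech_split[i])
--         i -= 1
--
--     return ' '.join(res)
-- ===== SOURCE B (Python) =====
-- def cut_commentator(speech: str):
--     words = speech.split(' ')
--     boundary = 0
--     for i in range(1, len(words)):
--         if "Commentator" in words[i]:
--             boundary = i
--     res = words[boundary + 1:]
--     res.reverse()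
--     return ' '.join(res)
-- ===== Notes on version B (the rewrite author's own statement) =====
-- stated objective: alternative
-- what changed: Replaces the backward while-loop that incrementally appends words until the first 'Commentator' hit with a forward scan recording the rightmost 'Commentator' index, followed by a single slice-and-reverse.
import Mathlib
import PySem

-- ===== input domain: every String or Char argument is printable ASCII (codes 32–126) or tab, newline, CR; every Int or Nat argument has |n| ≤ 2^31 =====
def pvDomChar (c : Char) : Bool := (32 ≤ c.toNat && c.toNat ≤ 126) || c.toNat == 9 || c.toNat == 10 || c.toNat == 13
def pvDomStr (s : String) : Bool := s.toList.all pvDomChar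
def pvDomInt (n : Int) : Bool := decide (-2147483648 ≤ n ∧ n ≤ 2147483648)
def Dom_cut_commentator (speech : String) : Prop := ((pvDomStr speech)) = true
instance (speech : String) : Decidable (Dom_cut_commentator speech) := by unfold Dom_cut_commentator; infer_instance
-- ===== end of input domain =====

-- B replaces A's backward collect-until-'Commentator' loop with a forward rightmost-match scan plus one slice-and-reverse; same cost, different decomposition.

-- ===== PORT A =====
-- while i > 0: break on "Commentator" in speech_split[i]; else res.append(speech_split[i]); i -= 1
def cutLoopA (words : List String) (i : Nat) (res : List String) : List String :=
  match i with
  | 0 => res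
  | Nat.succ j =>
    let w := PySem.List.pyGetD words ((Nat.succ j : Nat) : Int) ""
    if PySem.Str.isIn "Commentator" w then res
    else cutLoopA words j (res ++ [w])

-- speech.split(' ') is PySem.Str.split? with sep " " ≠ "", hence always `some`; `.getD []` is exact here
def cut_commentator (speech : String) : String :=
  let speech_split := (PySem.Str.split? speech " ").getD []
  PySem.Str.join " " (cutLoopA speech_split (speech_split.length - 1) [])

-- ===== PORT B =====
def cut_commentator_alt (speech : String) : String :=
  let words := (PySem.Str.split? speech " ").getD []
  let boundary := (PySem.List.pyRange 1 (words.length : Int) 1).foldl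
    (fun b i => if PySem.Str.isIn "Commentator" (PySem.List.pyGetD words i "") then i else b) 0
  let res := PySem.List.slice words (some (boundary + 1)) none
  PySem.Str.join " " res.reverse

-- ===== PRECONDITION & SPEC =====
def Spec_cut_commentator (speech : String) (out : String) : Prop := out = cut_commentator_alt speech
instance (speech : String) (out : String) : Decidable (Spec_cut_commentator speech out) := by unfold Spec_cut_commentator; infer_instance

-- ===== CLAIM (what is proved, stated in full; the proofs are below) =====
def Claim_equal_cut_commentator : Prop := ∀ (speech : String), Dom_cut_commentator speech → Spec_cut_commentator speech (cut_commentator speech)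

-- ===== LEMMAS AND PROOFS =====

-- rightmost index in [1, i] whose word satisfies P, else 0
def lastHit (P : String → Bool) (words : List String) : Nat → Nat
  | 0 => 0
  | Nat.succ j => if P (words.getD (j + 1) "") then j + 1 else lastHit P words j

theorem lastHit_le (P : String → Bool) (words : List String) (i : Nat) :
    lastHit P words i ≤ i := by
  induction i with
  | zero => simp [lastHit]
  | succ j ih => simp only [lastHit]; split <;> omega

-- A's loop with the predicate abstracted
def loopG (P : String → Bool) (words : List String) (i : Nat) (res : List String) : List String :=
  match i with
  | 0 => res
  | Nat.succ j =>
    if P (words.getD (j + 1) "") then res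
    else loopG P words j (res ++ [words.getD (j + 1) ""])

theorem cutLoopA_eq_loopG (words : List String) (i : Nat) (res : List String) :
    cutLoopA words i res = loopG (PySem.Str.isIn "Commentator") words i res := by
  induction i generalizing res with
  | zero => rfl
  | succ j ih =>
    show cutLoopA words (j + 1) res = _
    unfold cutLoopA loopG
    rw [show ((Nat.succ j : Nat) : Int) = ((j + 1 : Nat) : Int) by push_cast; ring,
      PySem.List.pyGetD_natCast]
    by_cases h : PySem.Str.isIn "Commentator" (words.getD (j + 1) "") = true
    · rw [if_pos h, if_pos h]
    · rw [if_neg h, if_neg h]; exact ih _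

-- B's foldl computes lastHit words (n-1)
theorem foldl_eq_lastHit (P : String → Bool) (words : List String) (n : Nat) :
    (PySem.List.pyRange 1 (n : Int) 1).foldl
      (fun b i => if P (PySem.List.pyGetD words i "") then i else b) 0
    = ((lastHit P words (n - 1) : Nat) : Int) := by
  induction n with
  | zero => simp [PySem.List.pyRange_one_eq_nil, lastHit]
  | succ k ih =>
    cases k with
    | zero => simp [PySem.List.pyRange_one_eq_nil, lastHit]
    | succ m =>
      rw [show ((m + 1 + 1 : Nat) : Int) = ((m + 1 : Nat) : Int) + 1 by push_cast; ring,
        PySem.List.pyRange_one_succ_right (by exact_mod_cast Nat.succ_le_succ (Nat.zero_le m)),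
        List.foldl_append]
      simp only [ih, List.foldl_cons, List.foldl_nil, PySem.List.pyGetD_natCast]
      simp only [Nat.succ_sub_one, lastHit]
      split <;> simp

-- A's loop collects the reverse of words[lastHit+1 .. i]
theorem loopG_spec (P : String → Bool) (words : List String) (i : Nat) (hi : i < words.length) :
    ∀ res, loopG P words i res
      = res ++ ((words.drop (lastHit P words i + 1)).take (i - lastHit P words i)).reverse := by
  induction i with
  | zero => intro res; simp [loopG, lastHit]
  | succ j ih =>
    intro res
    have hj : j < words.length := Nat.lt_of_succ_lt hi
    unfold loopG
    by_cases hP : P (words.getD (j + 1) "") = true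
    · rw [if_pos hP]
      have h1 : lastHit P words (j + 1) = j + 1 := by
        simp only [lastHit]; rw [if_pos hP]
      rw [h1]
      simp
    · rw [if_neg hP, ih hj]
      have hlh : lastHit P words (j + 1) = lastHit P words j := by
        simp only [lastHit]; rw [if_neg hP]
      have hle : lastHit P words j ≤ j := lastHit_le P words j
      rw [hlh]
      have hseg : (words.drop (lastHit P words j + 1)).take (j + 1 - lastHit P words j)
          = (words.drop (lastHit P words j + 1)).take (j - lastHit P words j)
            ++ [words.getD (j + 1) ""] := by
        have h1 : j + 1 - lastHit P words j = (j - lastHit P words j) + 1 := by omega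
        rw [h1, List.take_add_one, List.getElem?_drop]
        have h2 : lastHit P words j + 1 + (j - lastHit P words j) = j + 1 := by omega
        rw [h2, List.getElem?_eq_getElem hi, List.getD_eq_getElem words "" hi]
        rfl
      rw [hseg]
      simp

-- the common core, over the already-split word list
theorem core_eq (words : List String) :
    PySem.Str.join " " (cutLoopA words (words.length - 1) []) =
      PySem.Str.join " "
        (PySem.List.slice words
          (some ((PySem.List.pyRange 1 (words.length : Int) 1).foldl
            (fun b i => if PySem.Str.isIn "Commentator" (PySem.List.pyGetD words i "") then i else b) 0 + 1))
          none).reverse := by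
  rw [foldl_eq_lastHit (PySem.Str.isIn "Commentator") words words.length, cutLoopA_eq_loopG]
  cases hn : words.length with
  | zero =>
    have hnil : words = [] := List.eq_nil_of_length_eq_zero hn
    subst hnil
    rfl
  | succ m =>
    simp only [Nat.add_sub_cancel]
    have hm : m < words.length := by omega
    rw [loopG_spec (PySem.Str.isIn "Commentator") words m hm [],
      show ((lastHit (PySem.Str.isIn "Commentator") words m : Nat) : Int) + 1
          = ((lastHit (PySem.Str.isIn "Commentator") words m + 1 : Nat) : Int) by push_cast; ring,
      PySem.List.slice_from_natCast]
    have hle : lastHit (PySem.Str.isIn "Commentator") words m ≤ m :=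
      lastHit_le (PySem.Str.isIn "Commentator") words m
    have hfull : (words.drop (lastHit (PySem.Str.isIn "Commentator") words m + 1)).take
          (m - lastHit (PySem.Str.isIn "Commentator") words m)
        = words.drop (lastHit (PySem.Str.isIn "Commentator") words m + 1) := by
      apply List.take_of_length_le
      rw [List.length_drop]
      omega
    rw [hfull]
    simp

-- ===== VERDICT (by name: the statement is the Claim_ definition above) =====
theorem cut_commentator_spec : Claim_equal_cut_commentator := by
  intro speech _
  unfold Spec_cut_commentator cut_commentator cut_commentator_alt
  exact core_eq _
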